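-- pv_equiv track=rewrite | github.com/jinguo-aitech/financial-analysis | SPY_DTE_Analysis_V005.py | DaysILoosingStreak
-- ===== SOURCE A (Python) =====
-- def DaysILoosingStreak(mylist):
--     DaysInLoosingStreak = []
--     ink = 0
--     for indx, x in enumerate(mylist):
--         if x < 0:
--             ink += 1
--         else:
--             ink = 0
--         DaysInLoosingStreak.append(ink)
--     return DaysInLoosingStreak
-- ===== SOURCE B (Python) =====
-- def DaysILoosingStreak(mylist):
--     out = []
--     i = 0
--     n = len(mylist)
--     while i < n:
--         neg = mylist[i] < 0
--         j = i + 1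
--         while j < n and (mylist[j] < 0) == neg:
--             j += 1
--         run = j - i
--         out.extend(range(1, run + 1) if neg else [0] * run)
--         i = j
--     return out
-- ===== Notes on version B (the rewrite author's own statement) =====
-- stated objective: alternative
-- what changed: B splits the list into maximal same-sign runs and emits each run's output in bulk (range(1,len) for a negative run, zeros for a non-negative run), instead of A's element-by-element running counter.
import Mathlib
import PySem

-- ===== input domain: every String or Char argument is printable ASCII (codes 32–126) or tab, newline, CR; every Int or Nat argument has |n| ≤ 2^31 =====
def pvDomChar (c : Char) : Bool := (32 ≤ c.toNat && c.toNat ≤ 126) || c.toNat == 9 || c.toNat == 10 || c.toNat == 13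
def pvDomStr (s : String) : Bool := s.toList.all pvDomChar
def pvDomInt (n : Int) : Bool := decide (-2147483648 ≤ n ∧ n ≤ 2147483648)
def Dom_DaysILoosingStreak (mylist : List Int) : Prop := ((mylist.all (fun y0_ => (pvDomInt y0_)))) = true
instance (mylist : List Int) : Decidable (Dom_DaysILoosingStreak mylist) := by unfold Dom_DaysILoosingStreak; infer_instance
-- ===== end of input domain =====

-- B replaces A's element-by-element running counter with a run-splitting pass: it
-- emits each maximal same-sign run's output in bulk (objective: alternative).

-- ===== PORT A =====
-- A: single loop, counter ink incremented on negatives / reset on non-negatives,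
-- appended to the output list at every element.
def DaysILoosingStreak (mylist : List Int) : List Int :=
  (mylist.foldl
    (fun (s : Int × List Int) x =>
      let ink := if x < 0 then s.1 + 1 else (0 : Int)
      (ink, s.2 ++ [ink]))
    ((0 : Int), ([] : List Int))).2

-- ===== PORT B =====
-- B's outer while-loop: peel off one maximal run (same truth value of v<0 as the
-- head), emit its block, then recurse on the rest. The inner scan for the run's
-- extent is the takeWhile; the remainder is the dropWhile.
def DaysILoosingStreak_alt (mylist : List Int) : List Int :=
  match mylist with
  | [] => []
  | x :: xs =>
    let neg := decide (x < 0)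
    let runTail := xs.takeWhile (fun v => decide (v < 0) == neg)
    let run := 1 + runTail.length
    let block := if neg then (List.range run).map (fun k : Nat => (k : Int) + 1)
                 else List.replicate run (0 : Int)
    block ++ DaysILoosingStreak_alt (xs.dropWhile (fun v => decide (v < 0) == neg))
termination_by mylist.length
decreasing_by
  simpa using Nat.lt_succ_of_le (List.length_dropWhile_le _ _)

-- ===== PRECONDITION & SPEC =====
def Spec_DaysILoosingStreak (mylist : List Int) (out : List Int) : Prop := out = DaysILoosingStreak_alt mylist
instance (mylist : List Int) (out : List Int) : Decidable (Spec_DaysILoosingStreak mylist out) := by unfold Spec_DaysILoosingStreak; infer_instance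

-- ===== CLAIM (what is proved, stated in full; the proofs are below) =====
def Claim_equal_DaysILoosingStreak : Prop := ∀ (mylist : List Int), Dom_DaysILoosingStreak mylist → Spec_DaysILoosingStreak mylist (DaysILoosingStreak mylist)

-- ===== LEMMAS AND PROOFS =====

-- Reference recursion: A's running counter starting from c.
def fA (c : Int) : List Int → List Int
  | [] => []
  | x :: xs => let c' := if x < 0 then c + 1 else 0
               c' :: fA c' xs

theorem foldA (l : List Int) : ∀ (c : Int) (acc : List Int),
    (l.foldl
      (fun (s : Int × List Int) x =>
        let ink := if x < 0 then s.1 + 1 else (0 : Int)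
        (ink, s.2 ++ [ink]))
      (c, acc)).2 = acc ++ fA c l := by
  induction l with
  | nil => intro c acc; simp [fA]
  | cons x xs ih =>
      intro c acc
      simp only [List.foldl, fA]
      rw [ih]
      simp

theorem A_eq_fA (l : List Int) : DaysILoosingStreak l = fA 0 l := by
  unfold DaysILoosingStreak
  simpa using foldA l 0 []

-- A non-negative run of fA 0: zeros, then restart at 0 on the remainder.
theorem fA_nonneg_run (xs : List Int) :
    fA 0 xs = List.replicate (xs.takeWhile (fun v => decide (v < 0) == false)).length (0 : Int)
              ++ fA 0 (xs.dropWhile (fun v => decide (v < 0) == false)) := by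
  induction xs with
  | nil => simp
  | cons y ys ih =>
      by_cases hy : y < 0
      · simp [hy]
      · simp only [List.takeWhile_cons, List.dropWhile_cons, hy, decide_false, beq_self_eq_true,
          if_true, List.length_cons, List.replicate_succ, List.cons_append]
        simp only [fA, if_neg hy]
        exact congrArg _ ih

-- A negative run of fA c: c+1, c+2, …, then restart at 0 on the remainder
-- (whose head, if any, is non-negative, so the counter there is irrelevant).
theorem fA_neg_run (xs : List Int) : ∀ (c : Int),
    fA c xs = (List.range (xs.takeWhile (fun v => decide (v < 0) == true)).length).map
                (fun k : Nat => c + (k : Int) + 1)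
              ++ fA 0 (xs.dropWhile (fun v => decide (v < 0) == true)) := by
  induction xs with
  | nil => intro c; simp [fA]
  | cons y ys ih =>
      intro c
      by_cases hy : y < 0
      · simp only [List.takeWhile_cons, List.dropWhile_cons, hy, decide_true, beq_self_eq_true,
          if_true, List.length_cons, List.range_succ_eq_map, List.map_cons, List.map_map,
          List.cons_append]
        simp only [fA, if_pos hy]
        rw [ih (c + 1)]
        refine congrArg₂ _ (by norm_num) (congrArg₂ _ ?_ rfl)
        refine List.map_congr_left ?_
        intro k _; simp [Function.comp]; ring
      · simp only [List.takeWhile_cons, List.dropWhile_cons, hy, decide_false]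
        simp [fA, if_neg hy]

theorem alt_eq_fA (l : List Int) : DaysILoosingStreak_alt l = fA 0 l := by
  induction l using DaysILoosingStreak_alt.induct with
  | case1 => simp [DaysILoosingStreak_alt, fA]
  | case2 x xs neg ih =>
      have hv : neg = decide (x < 0) := rfl
      rw [hv] at ih
      rw [DaysILoosingStreak_alt]
      by_cases hx : x < 0
      · have hneg : decide (x < 0) = true := by simp [hx]
        rw [hneg] at ih ⊢
        rw [ih]
        have := fA_neg_run xs 1
        show (List.range (1 + (xs.takeWhile (fun v => decide (v < 0) == true)).length)).map
              (fun k : Nat => (k : Int) + 1) ++ fA 0 (xs.dropWhile (fun v => decide (v < 0) == true))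
            = fA 0 (x :: xs)
        rw [show fA 0 (x :: xs) = 1 :: fA 1 xs by simp [fA, hx], this]
        rw [Nat.add_comm 1, List.range_succ_eq_map, List.map_cons, List.map_map,
          List.cons_append]
        congr 1
        all_goals try norm_num
        all_goals (intro k _; ring)
      · have hneg : decide (x < 0) = false := by simp [hx]
        rw [hneg] at ih ⊢
        simp only [if_neg (by simp : ¬ (false = true))]
        rw [ih]
        show List.replicate (1 + (xs.takeWhile (fun v => decide (v < 0) == false)).length) (0:Int)
              ++ fA 0 (xs.dropWhile (fun v => decide (v < 0) == false))
            = fA 0 (x :: xs)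
        rw [show fA 0 (x :: xs) = 0 :: fA 0 xs by simp [fA, hx], fA_nonneg_run xs]
        rw [Nat.add_comm 1, List.replicate_succ]
        simp

-- ===== VERDICT (by name: the statement is the Claim_ definition above) =====
theorem DaysILoosingStreak_spec : Claim_equal_DaysILoosingStreak := by
  intro l _
  show DaysILoosingStreak l = DaysILoosingStreak_alt l
  rw [A_eq_fA, alt_eq_fA]
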